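-- pv_equiv track=rewrite | github.com/pan-kuleczka/uni-programming | SI/P1/zad4.py | opt_dist
-- ===== SOURCE A (Python) =====
-- def opt_dist(arr : list[int], d : int) -> int:
--     pref_sums = [0] * (len(arr) + 1)
--     pref_sums[0] = 0
--     for i in range(len(arr)):
--         pref_sums[i + 1] = pref_sums[i] + arr[i]
--     total_ones = pref_sums[-1]
--     best_result = len(arr)
--     for i in range(len(arr) - d + 1):
--         ones = pref_sums[i + d] - pref_sums[i]
--         zeros = d - ones
--         result = zeros + total_ones - ones
--         best_result = min(best_result, result)
--     return best_result
-- ===== SOURCE B (Python) =====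
-- def opt_dist(arr: list[int], d: int) -> int:
--     total = sum(arr)
--     best = len(arr)
--     window = 0
--     for i, x in enumerate(arr):
--         window += x
--         if i >= d:
--             window -= arr[i - d]
--         if i >= d - 1:
--             best = min(best, d + total - 2 * window)
--     return best
-- ===== Notes on version B (the rewrite author's own statement) =====
-- stated objective: simpler
-- what changed: Replaced the precomputed prefix-sum array plus index-window loop by a single incremental sliding-window pass (running window sum, best tracked on the fly), with no auxiliary array.
import Mathlib
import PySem

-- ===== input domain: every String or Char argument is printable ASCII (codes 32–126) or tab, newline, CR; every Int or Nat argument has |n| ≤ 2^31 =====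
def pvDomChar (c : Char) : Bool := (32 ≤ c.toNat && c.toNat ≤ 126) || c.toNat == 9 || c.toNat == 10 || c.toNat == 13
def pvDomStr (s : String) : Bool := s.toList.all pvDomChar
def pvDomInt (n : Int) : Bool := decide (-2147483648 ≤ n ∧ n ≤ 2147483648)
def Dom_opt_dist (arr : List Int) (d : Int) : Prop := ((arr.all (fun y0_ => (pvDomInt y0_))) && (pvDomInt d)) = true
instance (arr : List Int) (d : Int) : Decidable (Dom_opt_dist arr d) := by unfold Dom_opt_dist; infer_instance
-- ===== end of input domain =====

-- B replaces A's prefix-sum array + index loop by one incremental sliding-window pass (objective: simpler; O(1) extra space).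

-- ===== PORT A =====
-- the 'for i in range(len(arr)): pref_sums[i+1] = pref_sums[i] + arr[i]' loop: each step appends the next running sum
def prefGo (s : Int) : List Int → List Int
  | [] => []
  | x :: xs => (s + x) :: prefGo (s + x) xs

def opt_dist (arr : List Int) (d : Int) : Int :=
  let pref := 0 :: prefGo 0 arr
  let total := PySem.List.pyGetD pref (-1) 0
  (PySem.List.pyRange 0 ((arr.length : Int) - d + 1) 1).foldl
    (fun best i =>
      let ones := PySem.List.pyGetD pref (i + d) 0 - PySem.List.pyGetD pref i 0
      let zeros := d - ones
      min best (zeros + total - ones))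
    (arr.length : Int)

-- ===== PORT B =====
def opt_dist_alt (arr : List Int) (d : Int) : Int :=
  let total := arr.sum
  ((PySem.List.enumerate arr 0).foldl
    (fun (st : Int × Int) p =>
      let window := st.1 + p.2
      let window := if d ≤ p.1 then window - PySem.List.pyGetD arr (p.1 - d) 0 else window
      let best := if d - 1 ≤ p.1 then min st.2 (d + total - 2 * window) else st.2
      (window, best))
    (0, (arr.length : Int))).2

-- ===== PRECONDITION & SPEC =====
-- Pre_ excludes exactly d < 0, where A always raises IndexError (its index loop runs past the end of pref_sums).
def Pre_opt_dist (arr : List Int) (d : Int) : Prop := 0 ≤ d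
instance (arr : List Int) (d : Int) : Decidable (Pre_opt_dist arr d) := by unfold Pre_opt_dist; infer_instance
def pvWitness_opt_dist : List Int × Int := ([1, 0, 1], 2)

def Spec_opt_dist (arr : List Int) (d : Int) (out : Int) : Prop := out = opt_dist_alt arr d
instance (arr : List Int) (d : Int) (out : Int) : Decidable (Spec_opt_dist arr d out) := by unfold Spec_opt_dist; infer_instance

-- ===== CLAIM (what is proved, stated in full; the proofs are below) =====
def Claim_equal_opt_dist : Prop := ∀ (arr : List Int) (d : Int), Dom_opt_dist arr d → Pre_opt_dist arr d → Spec_opt_dist arr d (opt_dist arr d)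

-- ===== LEMMAS AND PROOFS =====

-- prefix sums: abbreviations used only by the proofs
def pvS (arr : List Int) (k : Nat) : Int := (arr.take k).sum
def pvV (arr : List Int) (d : Int) (j : Int) : Int :=
  d + arr.sum - 2 * (pvS arr (j + d).toNat - pvS arr j.toNat)

theorem prefGo_length (arr : List Int) : ∀ s : Int, (prefGo s arr).length = arr.length := by
  induction arr with
  | nil => intro s; rfl
  | cons x xs ih => intro s; simp [prefGo, ih]

theorem pref_getElem (arr : List Int) : ∀ (j : Nat) (h : j < arr.length + 1),
    (0 :: prefGo 0 arr)[j]'(by simp [prefGo_length]; omega) = pvS arr j := by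
  have key : ∀ (xs : List Int) (s : Int) (j : Nat) (h : j < xs.length),
      (prefGo s xs)[j]'(by rw [prefGo_length]; exact h) = s + pvS xs (j + 1) := by
    intro xs
    induction xs with
    | nil => intro s j h; simp at h
    | cons x t ih =>
      intro s j h
      cases j with
      | zero => simp [prefGo, pvS]
      | succ j =>
        have hj : j < t.length := by simpa using h
        simp only [prefGo, List.getElem_cons_succ]
        rw [ih (s + x) j hj]
        unfold pvS
        rw [List.take_succ_cons]
        simp
        rw [add_assoc]
  intro j h
  cases j with
  | zero => simp [pvS]
  | succ j =>
    have hj : j < arr.length := by omega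
    simp only [List.getElem_cons_succ]
    rw [key arr 0 j hj]
    simp

theorem pref_get (arr : List Int) (i : Int) (h0 : 0 ≤ i) (h1 : i ≤ (arr.length : Int)) :
    PySem.List.pyGetD (0 :: prefGo 0 arr) i 0 = pvS arr i.toNat := by
  have hlen : ((0 :: prefGo 0 arr).length : Int) = (arr.length : Int) + 1 := by
    simp [prefGo_length]
  rw [PySem.List.pyGetD_eq_getElem _ _ h0 (by omega)]
  exact pref_getElem arr i.toNat (by omega)

theorem pref_total (arr : List Int) :
    PySem.List.pyGetD (0 :: prefGo 0 arr) (-1) 0 = arr.sum := by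
  rw [PySem.List.pyGetD_neg_one _ _ (by simp)]
  rw [List.getLast_eq_getElem]
  have h : (0 :: prefGo 0 arr).length - 1 = arr.length := by simp [prefGo_length]
  have := pref_getElem arr arr.length (by omega)
  simp only [h]
  rw [this]
  simp [pvS]

theorem A_eq (arr : List Int) (d : Int) (hd : 0 ≤ d) :
    opt_dist arr d
      = (PySem.List.pyRange 0 ((arr.length : Int) - d + 1) 1).foldl
          (fun b j => min b (pvV arr d j)) (arr.length : Int) := by
  unfold opt_dist
  simp only [pref_total]
  apply PySem.List.foldl_congr_mem
  intro b i hi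
  rw [PySem.List.mem_pyRange_one] at hi
  rw [pref_get arr (i + d) (by omega) (by omega), pref_get arr i (by omega) (by omega)]
  unfold pvV
  ring_nf

-- the single step of B's sliding-window loop
def pvStep (arr : List Int) (d : Int) (total : Int) (st : Int × Int) (p : Int × Int) : Int × Int :=
  let window := st.1 + p.2
  let window := if d ≤ p.1 then window - PySem.List.pyGetD arr (p.1 - d) 0 else window
  let best := if d - 1 ≤ p.1 then min st.2 (d + total - 2 * window) else st.2
  (window, best)

theorem B_loop (arr : List Int) (d : Int) (hd : 0 ≤ d) :
    ∀ (m k : Nat), arr.length - k = m → k ≤ arr.length → ∀ b : Int,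
    ((PySem.List.enumerate (arr.drop k) (k : Int)).foldl (pvStep arr d arr.sum)
        (pvS arr k - pvS arr (k - d.toNat), b)).2
      = (PySem.List.pyRange (max ((k : Int) + 1 - d) 0) ((arr.length : Int) - d + 1) 1).foldl
          (fun b j => min b (pvV arr d j)) b := by
  intro m
  induction m with
  | zero =>
    intro k hm hk b
    have hkn : k = arr.length := by omega
    subst hkn
    rw [List.drop_length]
    rw [PySem.List.pyRange_one_eq_nil (by omega)]
    rfl
  | succ m ih =>
    intro k hm hk b
    have hklt : k < arr.length := by omega
    rw [List.drop_eq_getElem_cons hklt, PySem.List.enumerate_cons, List.foldl_cons]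
    have hstep : pvStep arr d arr.sum (pvS arr k - pvS arr (k - d.toNat), b) ((k : Int), arr[k])
        = (pvS arr (k+1) - pvS arr (k + 1 - d.toNat),
           if d - 1 ≤ (k : Int) then min b (pvV arr d ((k : Int) + 1 - d)) else b) := by
      simp only [pvStep]
      have hsum : pvS arr k + arr[k] = pvS arr (k+1) := (List.sum_take_succ arr k hklt).symm
      by_cases hdk : d ≤ (k : Int)
      · have h1 : 0 ≤ (k : Int) - d := by omega
        have h2 : (k : Int) - d < (arr.length : Int) := by omega
        simp only [if_pos hdk]
        have hget : PySem.List.pyGetD arr ((k : Int) - d) 0 = arr[((k : Int) - d).toNat]'(by omega) :=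
          PySem.List.pyGetD_eq_getElem _ _ h1 h2
        have htn : ((k : Int) - d).toNat = k - d.toNat := by omega
        have hlt2 : k - d.toNat < arr.length := by omega
        have hsum2 : pvS arr (k - d.toNat) + arr[k - d.toNat] = pvS arr (k - d.toNat + 1) :=
          (List.sum_take_succ arr (k - d.toNat) hlt2).symm
        have heq1 : k - d.toNat + 1 = k + 1 - d.toNat := by omega
        have hwin : pvS arr k - pvS arr (k - d.toNat) + arr[k]
            - PySem.List.pyGetD arr ((k : Int) - d) 0
            = pvS arr (k+1) - pvS arr (k + 1 - d.toNat) := by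
          rw [hget]
          simp only [htn]
          rw [← heq1, ← hsum2, ← hsum]
          ring
        have hd1 : d - 1 ≤ (k : Int) := by omega
        simp only [hwin, if_pos hd1]
        have hv : pvV arr d ((k : Int) + 1 - d) = d + arr.sum - 2 * (pvS arr (k+1) - pvS arr (k + 1 - d.toNat)) := by
          unfold pvV
          have e1 : ((k : Int) + 1 - d + d).toNat = k + 1 := by omega
          have e2 : ((k : Int) + 1 - d).toNat = k + 1 - d.toNat := by omega
          rw [e1, e2]
        rw [hv]
      · have hkd : (k : Int) < d := by omega
        simp only [if_neg hdk]
        have e1 : k - d.toNat = 0 := by omega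
        have hwin : pvS arr k - pvS arr (k - d.toNat) + arr[k] = pvS arr (k+1) - pvS arr (k + 1 - d.toNat) := by
          by_cases hke : (k : Int) + 1 ≤ d
          · have e2 : k + 1 - d.toNat = 0 := by omega
            rw [e1, e2, ← hsum]; ring
          · have hkd1 : d = (k : Int) + 1 := by omega
            have e2 : k + 1 - d.toNat = 0 := by omega
            rw [e1, e2, ← hsum]; ring
        rw [hwin]
        by_cases hd1 : d - 1 ≤ (k : Int)
        · have hdk1 : d = (k : Int) + 1 := by omega
          have hv : pvV arr d ((k : Int) + 1 - d) = d + arr.sum - 2 * (pvS arr (k+1) - pvS arr (k + 1 - d.toNat)) := by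
            unfold pvV
            have e1' : ((k : Int) + 1 - d + d).toNat = k + 1 := by omega
            have e2' : ((k : Int) + 1 - d).toNat = k + 1 - d.toNat := by omega
            rw [e1', e2']
          simp only [if_pos hd1]
          rw [hv]
        · simp only [if_neg hd1]
    rw [hstep]
    have ihk := ih (k+1) (by omega) (by omega)
    push_cast at ihk
    rw [ihk]
    by_cases hd1 : d - 1 ≤ (k : Int)
    · rw [if_pos hd1]
      have hmax1 : max ((k : Int) + 1 - d) 0 = (k : Int) + 1 - d := by omega
      have hmax2 : max ((k : Int) + 1 + 1 - d) 0 = (k : Int) + 1 + 1 - d := by omega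
      rw [hmax1, hmax2]
      conv_rhs => rw [PySem.List.pyRange_one_cons (show (k : Int) + 1 - d < (arr.length : Int) - d + 1 by omega), List.foldl_cons]
      have heq : (k : Int) + 1 - d + 1 = (k : Int) + 1 + 1 - d := by ring
      rw [heq]
    · rw [if_neg hd1]
      have hmax1 : max ((k : Int) + 1 - d) 0 = 0 := by omega
      have hmax2 : max ((k : Int) + 1 + 1 - d) 0 = 0 := by omega
      rw [hmax1, hmax2]

theorem B_eq (arr : List Int) (d : Int) (hd : 0 ≤ d) :
    opt_dist_alt arr d
      = (PySem.List.pyRange (max (1 - d) 0) ((arr.length : Int) - d + 1) 1).foldl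
          (fun b j => min b (pvV arr d j)) (arr.length : Int) := by
  show ((PySem.List.enumerate arr 0).foldl (pvStep arr d arr.sum) (0, (arr.length : Int))).2 = _
  have h0 := B_loop arr d hd arr.length 0 (by omega) (by omega) (arr.length : Int)
  simp only [List.drop_zero, Nat.cast_zero, Nat.zero_sub] at h0
  have hinit : pvS arr 0 - pvS arr 0 = 0 := by simp [pvS]
  rw [hinit] at h0
  have hmax : max ((0 : Int) + 1 - d) 0 = max (1 - d) 0 := by omega
  rw [hmax] at h0
  exact h0

theorem foldl_min_const (c : Int) : ∀ (l : List Int) (b : Int),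
    l.foldl (fun b _ => min b c) b = if l.isEmpty then b else min b c := by
  intro l
  induction l with
  | nil => intro b; simp
  | cons x t ih =>
    intro b
    simp only [List.foldl_cons, List.isEmpty_cons, ih]
    cases t <;> simp

-- ===== VERDICT (by name: the statement is the Claim_ definition above) =====
theorem opt_dist_spec : Claim_equal_opt_dist := by
  intro arr d _ hd
  unfold Spec_opt_dist Pre_opt_dist at *
  rw [A_eq arr d hd, B_eq arr d hd]
  by_cases hd1 : 1 ≤ d
  · have : max (1 - d) 0 = 0 := by omega
    rw [this]
  · have hd0 : d = 0 := by omega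
    subst hd0
    have hmax : max (1 - (0:Int)) 0 = 1 := by omega
    rw [hmax]
    have hv : ∀ j, pvV arr 0 j = arr.sum := by
      intro j; unfold pvV; ring_nf
    have hfun : (fun (b j : Int) => min b (pvV arr 0 j)) = (fun (b : Int) (_ : Int) => min b arr.sum) := by
      funext b j; rw [hv]
    rw [hfun]
    rw [show ((arr.length : Int) - 0 + 1) = (arr.length : Int) + 1 by ring]
    rw [PySem.List.pyRange_one_cons (by omega), List.foldl_cons]
    rw [foldl_min_const, foldl_min_const]
    rcases arr with _ | ⟨x, t⟩
    · simp [PySem.List.pyRange_one_eq_nil]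
    · have hne : (PySem.List.pyRange 1 (((x :: t).length : Int) + 1) 1).isEmpty = false := by
        rw [PySem.List.pyRange_one_cons (by simp only [List.length_cons]; push_cast; omega)]
        rfl
      rw [hne]
      simp
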